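-- pv_equiv track=rewrite | github.com/ggaem97/study | 2022-02-01/newBracket.py | solution
-- ===== SOURCE A (Python) =====
-- def solution(s):
--     n = len(s)
--     result = 1
--     answer = 0
--     stack = []
--     for i in range(n):
--         if s[i] == '(':
--             stack.append('(')
--             result *= 2
--         elif s[i] == ')':
--             if not stack or stack[-1] == '[':
--                 return 0
--             elif s[i-1] == '(':
--                 answer += result
--             result //= 2
--             stack.pop()
--         elif s[i] == '[':
--             result *= 3
--             stack.append('[')
--         else:
--             if not stack or stack[-1] == '(':
--                 return 0
--             elif s[i-1] == '[':
--                 answer += result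
--             result //= 3
--             stack.pop()
--     if stack:
--         return 0
--     return answer
-- ===== SOURCE B (Python) =====
-- def solution(s):
--     # Recursive-descent parser over the nested bracket structure.
--     # parse(i) parses a maximal sequence of sibling groups starting at i and
--     # returns (total_value, next_index), or None if the structure is broken.
--     # Characters other than '(', ')', '[' act exactly like ']' (they only
--     # close a '[' group), mirroring the original's classification.
--     n = len(s)
--
--     def parse(i):
--         total = 0
--         while i < n and (s[i] == '(' or s[i] == '['):
--             opener = s[i]
--             mult = 2 if opener == '(' else 3
--             r = parse(i + 1)
--             if r is None:
--                 return None
--             inner, j = r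
--             if j >= n:
--                 return None  # opener never closed
--             d = s[j]
--             if opener == '(':
--                 ok = (d == ')')
--             else:
--                 ok = (d != '(' and d != ')' and d != '[')
--             if not ok:
--                 return None  # mismatched closer
--             v = mult if j == i + 1 else mult * inner
--             total += v
--             i = j + 1
--         return (total, i)
--
--     r = parse(0)
--     if r is None:
--         return 0
--     total, j = r
--     return total if j == n else 0
-- ===== Notes on version B (the rewrite author's own statement) =====
-- stated objective: alternative
-- what changed: Replaces A's indexed loop with an explicit bracket stack, running multiplier and look-back at s[i-1] by a recursive-descent parser over the nested bracket structure that values each group as 2x/3x its recursively parsed inner value (or the base 2/3 for an empty group) and sums sibling groups, returning 0 on any mismatch, unclosed opener or leftover input.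
import Mathlib
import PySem

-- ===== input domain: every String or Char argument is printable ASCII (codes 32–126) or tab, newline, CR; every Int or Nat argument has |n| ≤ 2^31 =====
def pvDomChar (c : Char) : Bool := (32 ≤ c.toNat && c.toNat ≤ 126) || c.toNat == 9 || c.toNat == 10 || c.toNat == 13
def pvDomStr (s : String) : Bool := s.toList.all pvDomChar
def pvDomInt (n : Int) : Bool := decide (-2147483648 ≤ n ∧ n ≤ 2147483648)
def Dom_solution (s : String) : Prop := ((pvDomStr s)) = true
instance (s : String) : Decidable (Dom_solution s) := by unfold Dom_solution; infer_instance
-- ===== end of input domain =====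

-- B re-implements the stack/counter loop as a recursive-descent parser over the
-- nested bracket structure (alternative decomposition, same exact behaviour).

-- ===== PORT A =====
-- Literal port of A's indexed for-loop with an explicit bracket stack,
-- running multiplier `result` and accumulator `answer`; early `return 0`
-- becomes returning 0 from the recursion.
def loopA (cs : List Char) (i : Nat) (stack : List Char) (result answer : Int) : Int :=
  if _h : i < cs.length then
    let c := cs.getD i ' '
    if c = '(' then
      loopA cs (i+1) ('(' :: stack) (result * 2) answer
    else if c = ')' then
      match stack with
      | [] => 0
      | top :: st' =>
        if top = '[' then 0
        else
          loopA cs (i+1) st' (PySem.Int.floordiv result 2)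
            (if (PySem.List.pyGet? cs ((i : Int) - 1)).getD ' ' = '(' then answer + result else answer)
    else if c = '[' then
      loopA cs (i+1) ('[' :: stack) (result * 3) answer
    else
      match stack with
      | [] => 0
      | top :: st' =>
        if top = '(' then 0
        else
          loopA cs (i+1) st' (PySem.Int.floordiv result 3)
            (if (PySem.List.pyGet? cs ((i : Int) - 1)).getD ' ' = '[' then answer + result else answer)
  else
    if stack = [] then answer else 0
termination_by cs.length - i
decreasing_by all_goals omega

def solution (s : String) : Int := loopA s.toList 0 [] 1 0

-- ===== PORT B =====
-- Port of B's recursive-descent `parse`: parse a maximal sequence of sibling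
-- groups, each an opener, a recursively parsed inner value, and its closer
-- (any char other than '(' , ')' , '[' closes '[' like ']'); the Python
-- while-loop over siblings becomes the trailing recursive call; `fuel`
-- (length+1 at the top call) only guards termination of the recursion.
def parseB (fuel : Nat) (cs : List Char) : Option (Int × List Char) :=
  match fuel, cs with
  | 0, _ => none
  | _ + 1, [] => some (0, ([] : List Char))
  | fuel + 1, c :: rest =>
    if c = '(' ∨ c = '[' then
      let m : Int := if c = '(' then 2 else 3
      match parseB fuel rest with
      | none => none
      | some (inner, r1) =>
        match r1 with
        | [] => none
        | d :: r2 =>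
          if (if c = '(' then d = ')' else ¬(d = '(' ∨ d = ')' ∨ d = '[')) then
            match parseB fuel r2 with
            | none => none
            | some (t, r3) =>
              some ((if r1.length = rest.length then m else m * inner) + t, r3)
          else none
    else some (0, c :: rest)

def solution_alt (s : String) : Int :=
  match parseB (s.toList.length + 1) s.toList with
  | none => 0
  | some (t, rest) => if rest = [] then t else 0

-- ===== PRECONDITION & SPEC =====
def Spec_solution (s : String) (out : Int) : Prop := out = solution_alt s
instance (s : String) (out : Int) : Decidable (Spec_solution s out) := by unfold Spec_solution; infer_instance

-- ===== CLAIM (what is proved, stated in full; the proofs are below) =====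
def Claim_equal_solution : Prop := ∀ (s : String), Dom_solution s → Spec_solution s (solution s)

-- ===== LEMMAS AND PROOFS =====

-- A's loop re-expressed on the remaining suffix, carrying the previous
-- character explicitly (used only by the proofs).
def loopH : Char → List Char → List Char → Int → Int → Int
  | _, [], st, _, ans => if st = [] then ans else 0
  | prev, x :: xs, st, res, ans =>
    if x = '(' then loopH x xs ('(' :: st) (res * 2) ans
    else if x = ')' then
      match st with
      | [] => 0
      | top :: st' =>
        if top = '[' then 0
        else loopH x xs st' (PySem.Int.floordiv res 2) (if prev = '(' then ans + res else ans)
    else if x = '[' then loopH x xs ('[' :: st) (res * 3) ans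
    else
      match st with
      | [] => 0
      | top :: st' =>
        if top = '(' then 0
        else loopH x xs st' (PySem.Int.floordiv res 3) (if prev = '[' then ans + res else ans)

lemma floordiv_mul_cancel (r m : Int) (hm : 0 < m) : PySem.Int.floordiv (r * m) m = r := by
  rw [PySem.Int.floordiv_eq_ediv_of_pos hm]
  exact Int.mul_ediv_cancel r (by omega)

lemma loopA_eq_loopH (cs : List Char) : ∀ (k i : Nat), cs.length ≤ i + k → ∀ st res ans,
    loopA cs i st res ans
      = loopH ((PySem.List.pyGet? cs ((i : Int) - 1)).getD ' ') (cs.drop i) st res ans := by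
  intro k
  induction k with
  | zero =>
    intro i hik st res ans
    have hge : ¬ i < cs.length := by omega
    rw [loopA.eq_def, dif_neg hge, List.drop_eq_nil_of_le (by omega)]
    simp [loopH]
  | succ k ih =>
    intro i hik st res ans
    by_cases h : i < cs.length
    · have hdrop : cs.drop i = cs[i] :: cs.drop (i+1) := List.drop_eq_getElem_cons h
      have hgetD : cs.getD i ' ' = cs[i] := List.getD_eq_getElem cs ' ' h
      have hnext : ((PySem.List.pyGet? cs (((i+1 : Nat) : Int) - 1)).getD ' ') = cs[i] := by
        have : ((i+1 : Nat) : Int) - 1 = (i : Int) := by push_cast; ring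
        rw [this, PySem.List.pyGet?_natCast, List.getElem?_eq_getElem h, Option.getD_some]
      rw [loopA.eq_def, dif_pos h, hdrop, loopH.eq_def]
      dsimp only
      rw [hgetD]
      by_cases h1 : cs[i] = '('
      · simp only [if_pos h1]
        rw [ih (i+1) (by omega), hnext, h1]
      · simp only [if_neg h1]
        by_cases h2 : cs[i] = ')'
        · simp only [if_pos h2]
          cases st with
          | nil => rfl
          | cons top st' =>
            by_cases h3 : top = '['
            · simp only [if_pos h3]
            · simp only [if_neg h3]
              rw [ih (i+1) (by omega), hnext, h2]
        · simp only [if_neg h2]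
          by_cases h3 : cs[i] = '['
          · simp only [if_pos h3]
            rw [ih (i+1) (by omega), hnext, h3]
          · simp only [if_neg h3]
            cases st with
            | nil => rfl
            | cons top st' =>
              by_cases h4 : top = '('
              · simp only [if_pos h4]
              · simp only [if_neg h4]
                rw [ih (i+1) (by omega), hnext]
    · have hge := h
      rw [loopA.eq_def, dif_neg hge, List.drop_eq_nil_of_le (by omega)]
      simp [loopH]

lemma parseB_props (fuel : Nat) : ∀ (cs : List Char) (t : Int) (rest : List Char),
    parseB fuel cs = some (t, rest) →
    rest.length ≤ cs.length ∧ (cs.length ≤ rest.length → t = 0) ∧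
      (∀ d r2, rest = d :: r2 → d ≠ '(' ∧ d ≠ '[') := by
  induction fuel with
  | zero => intro cs t rest h; simp [parseB] at h
  | succ f ih =>
    intro cs t rest h
    match cs with
    | [] =>
      simp only [parseB, Option.some.injEq, Prod.mk.injEq] at h
      obtain ⟨ht, hr⟩ := h
      subst ht; subst hr
      refine ⟨by simp, fun _ => rfl, by simp⟩
    | c :: cs' =>
      rw [parseB] at h
      by_cases hc : c = '(' ∨ c = '['
      · rw [if_pos hc] at h
        rcases h1 : parseB f cs' with _ | ⟨inner, r1⟩ <;> rw [h1] at h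
        · simp at h
        · rcases r1 with _ | ⟨d, r2⟩
          · simp at h
          · dsimp only at h
            by_cases hok : (if c = '(' then d = ')' else ¬(d = '(' ∨ d = ')' ∨ d = '['))
            · rw [if_pos hok] at h
              rcases h2 : parseB f r2 with _ | ⟨t2, r3⟩ <;> rw [h2] at h
              · simp at h
              · simp only [Option.some.injEq, Prod.mk.injEq] at h
                obtain ⟨ht, hr⟩ := h
                subst hr
                have p1 := ih cs' inner (d :: r2) h1
                have p2 := ih r2 t2 r3 h2
                have hl1 : (d :: r2).length ≤ cs'.length := p1.1
                have hl2 : r3.length ≤ r2.length := p2.1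
                simp only [List.length_cons] at hl1
                refine ⟨by simp only [List.length_cons]; omega,
                  fun hge => ?_, p2.2.2⟩
                exfalso
                simp only [List.length_cons] at hge
                omega
            · rw [if_neg hok] at h
              simp at h
      · rw [if_neg hc] at h
        simp only [Option.some.injEq, Prod.mk.injEq] at h
        obtain ⟨ht, hr⟩ := h
        subst ht; subst hr
        refine ⟨le_refl _, fun _ => rfl, ?_⟩
        intro d r2 hdr
        cases hdr
        push Not at hc
        exact hc

lemma loopH_nil (prev : Char) (st : List Char) (res ans : Int) :
    loopH prev [] st res ans = if st = [] then ans else 0 := rfl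

lemma loopH_open_paren (prev : Char) (xs st : List Char) (res ans : Int) :
    loopH prev ('(' :: xs) st res ans = loopH '(' xs ('(' :: st) (res * 2) ans := rfl

lemma loopH_open_brack (prev : Char) (xs st : List Char) (res ans : Int) :
    loopH prev ('[' :: xs) st res ans = loopH '[' xs ('[' :: st) (res * 3) ans := rfl

lemma loopH_close_paren (prev : Char) (xs st' : List Char) (res ans : Int) :
    loopH prev (')' :: xs) ('(' :: st') res ans
      = loopH ')' xs st' (PySem.Int.floordiv res 2) (if prev = '(' then ans + res else ans) := rfl

lemma loopH_close_paren_mismatch (prev : Char) (xs st' : List Char) (res ans : Int) :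
    loopH prev (')' :: xs) ('[' :: st') res ans = 0 := rfl

lemma loopH_close_paren_empty (prev : Char) (xs : List Char) (res ans : Int) :
    loopH prev (')' :: xs) [] res ans = 0 := rfl

lemma loopH_stray_close (prev d : Char) (hd1 : d ≠ '(') (hd2 : d ≠ ')') (hd3 : d ≠ '[')
    (xs st' : List Char) (res ans : Int) :
    loopH prev (d :: xs) ('[' :: st') res ans
      = loopH d xs st' (PySem.Int.floordiv res 3) (if prev = '[' then ans + res else ans) := by
  rw [loopH.eq_def]
  dsimp only
  rw [if_neg hd1, if_neg hd2, if_neg hd3]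
  simp

lemma loopH_stray_mismatch (prev d : Char) (hd1 : d ≠ '(') (hd2 : d ≠ ')') (hd3 : d ≠ '[')
    (xs st' : List Char) (res ans : Int) :
    loopH prev (d :: xs) ('(' :: st') res ans = 0 := by
  rw [loopH.eq_def]
  dsimp only
  rw [if_neg hd1, if_neg hd2, if_neg hd3]
  simp

lemma loopH_stray_empty (prev d : Char) (hd1 : d ≠ '(') (hd2 : d ≠ ')') (hd3 : d ≠ '[')
    (xs : List Char) (res ans : Int) :
    loopH prev (d :: xs) [] res ans = 0 := by
  rw [loopH.eq_def]
  dsimp only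
  rw [if_neg hd1, if_neg hd2, if_neg hd3]

lemma mainB : ∀ (fuel : Nat) (cs : List Char), cs.length < fuel →
    (parseB fuel cs = none → ∀ st res ans prev, loopH prev cs st res ans = 0) ∧
    (∀ t rest, parseB fuel cs = some (t, rest) → ∀ st res ans prev,
      ∃ p, ((rest = cs ∧ p = prev) ∨ (rest.length < cs.length ∧ p ≠ '(' ∧ p ≠ '[')) ∧
        loopH prev cs st res ans = loopH p rest st res (ans + res * t)) := by
  intro fuel
  induction fuel with
  | zero => intro cs h; omega
  | succ f ih =>
    intro cs hlen
    match cs with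
    | [] =>
      refine ⟨fun h => by simp [parseB] at h, fun t rest h st res ans prev => ?_⟩
      simp only [parseB, Option.some.injEq, Prod.mk.injEq] at h
      obtain ⟨ht, hr⟩ := h
      subst ht; subst hr
      exact ⟨prev, Or.inl ⟨rfl, rfl⟩, by rw [mul_zero, add_zero]⟩
    | c :: cs' =>
      have hlen' : cs'.length < f := by simp only [List.length_cons] at hlen; omega
      by_cases hc : c = '(' ∨ c = '['
      · rcases hc with hc | hc <;> subst hc
        · -- c = '('
          refine ⟨?_, ?_⟩
          · intro h st res ans prev
            rw [parseB, if_pos (Or.inl rfl)] at h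
            dsimp only at h
            rcases h1 : parseB f cs' with _ | ⟨inner, r1⟩ <;> rw [h1] at h
            · rw [loopH_open_paren]
              exact (ih cs' hlen').1 h1 ('(' :: st) (res * 2) ans '('
            · obtain ⟨p1, hp1, heq1⟩ :=
                (ih cs' hlen').2 inner r1 h1 ('(' :: st) (res * 2) ans '('
              rcases r1 with _ | ⟨d, r2⟩
              · rw [loopH_open_paren, heq1]
                simp [loopH_nil]
              · have props1 := parseB_props f cs' inner (d :: r2) h1
                have hd13 := props1.2.2 d r2 rfl
                have hr2f : r2.length < f := by
                  have := props1.1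
                  simp only [List.length_cons] at this
                  omega
                simp only [reduceIte] at h
                by_cases hd2 : d = ')'
                · subst hd2
                  rw [if_pos rfl] at h
                  rcases h2 : parseB f r2 with _ | ⟨t2, r3⟩ <;> rw [h2] at h
                  · rw [loopH_open_paren, heq1, loopH_close_paren,
                      floordiv_mul_cancel res 2 (by norm_num)]
                    exact (ih r2 hr2f).1 h2 st res _ ')'
                  · simp at h
                · rw [if_neg hd2] at h
                  rw [loopH_open_paren, heq1,
                    loopH_stray_mismatch p1 d hd13.1 hd2 hd13.2]
          · intro t rest h st res ans prev
            rw [parseB, if_pos (Or.inl rfl)] at h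
            dsimp only at h
            rcases h1 : parseB f cs' with _ | ⟨inner, r1⟩ <;> rw [h1] at h
            · simp at h
            · rcases r1 with _ | ⟨d, r2⟩
              · simp at h
              · have props1 := parseB_props f cs' inner (d :: r2) h1
                have hd13 := props1.2.2 d r2 rfl
                have hlr1 : (d :: r2).length ≤ cs'.length := props1.1
                have hr2f : r2.length < f := by
                  simp only [List.length_cons] at hlr1; omega
                simp only [reduceIte] at h
                by_cases hd2 : d = ')'
                · subst hd2
                  rw [if_pos rfl] at h
                  rcases h2 : parseB f r2 with _ | ⟨t2, r3⟩ <;> rw [h2] at h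
                  · simp at h
                  · simp only [Option.some.injEq, Prod.mk.injEq] at h
                    obtain ⟨ht, hr⟩ := h
                    subst ht; subst hr
                    obtain ⟨p1, hp1, heq1⟩ :=
                      (ih cs' hlen').2 inner (')' :: r2) h1 ('(' :: st) (res * 2) ans '('
                    set v : Int :=
                      (if (')' :: r2).length = cs'.length then (2:Int) else 2 * inner) with hv
                    obtain ⟨p3, hp3, heq3⟩ :=
                      (ih r2 hr2f).2 t2 r3 h2 st res (ans + res * v) ')'
                    have hans :
                        (if p1 = '(' then ans + res * 2 * inner + (res * 2)
                          else ans + res * 2 * inner) = ans + res * v := by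
                      rcases hp1 with ⟨hre, hpe⟩ | ⟨hrl, hne1, hne2⟩
                      · have hinner : inner = 0 := props1.2.1 (by rw [hre])
                        rw [hv, if_pos hpe, if_pos (by rw [hre]), hinner]
                        ring
                      · rw [hv, if_neg hne1,
                          if_neg (by simp only [List.length_cons] at hrl ⊢; omega)]
                        ring
                    refine ⟨p3, Or.inr ⟨?_, ?_⟩, ?_⟩
                    · rcases hp3 with ⟨h3e, _⟩ | ⟨h3l, _⟩
                      · rw [h3e]; simp only [List.length_cons] at hlr1 ⊢; omega
                      · simp only [List.length_cons] at hlr1 ⊢; omega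
                    · rcases hp3 with ⟨_, hpe⟩ | ⟨_, hne⟩
                      · rw [hpe]; exact ⟨by decide, by decide⟩
                      · exact hne
                    · rw [loopH_open_paren, heq1, loopH_close_paren,
                        floordiv_mul_cancel res 2 (by norm_num), hans, heq3]
                      congr 1
                      ring
                · rw [if_neg hd2] at h
                  simp at h
        · -- c = '['
          refine ⟨?_, ?_⟩
          · intro h st res ans prev
            rw [parseB, if_pos (Or.inr rfl)] at h
            dsimp only at h
            rcases h1 : parseB f cs' with _ | ⟨inner, r1⟩ <;> rw [h1] at h
            · rw [loopH_open_brack]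
              exact (ih cs' hlen').1 h1 ('[' :: st) (res * 3) ans '['
            · obtain ⟨p1, hp1, heq1⟩ :=
                (ih cs' hlen').2 inner r1 h1 ('[' :: st) (res * 3) ans '['
              rcases r1 with _ | ⟨d, r2⟩
              · rw [loopH_open_brack, heq1]
                simp [loopH_nil]
              · have props1 := parseB_props f cs' inner (d :: r2) h1
                have hd13 := props1.2.2 d r2 rfl
                have hr2f : r2.length < f := by
                  have := props1.1
                  simp only [List.length_cons] at this
                  omega
                simp only [Char.reduceEq, reduceIte] at h
                by_cases hd2 : d = ')'
                · subst hd2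
                  rw [if_neg (not_not_intro (Or.inr (Or.inl rfl)))] at h
                  rw [loopH_open_brack, heq1, loopH_close_paren_mismatch]
                · have hok : ¬(d = '(' ∨ d = ')' ∨ d = '[') := by
                    rintro (h' | h' | h')
                    exacts [hd13.1 h', hd2 h', hd13.2 h']
                  rw [if_pos hok] at h
                  rcases h2 : parseB f r2 with _ | ⟨t2, r3⟩ <;> rw [h2] at h
                  · rw [loopH_open_brack, heq1,
                      loopH_stray_close p1 d hd13.1 hd2 hd13.2,
                      floordiv_mul_cancel res 3 (by norm_num)]
                    exact (ih r2 hr2f).1 h2 st res _ d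
                  · simp at h
          · intro t rest h st res ans prev
            rw [parseB, if_pos (Or.inr rfl)] at h
            dsimp only at h
            rcases h1 : parseB f cs' with _ | ⟨inner, r1⟩ <;> rw [h1] at h
            · simp at h
            · rcases r1 with _ | ⟨d, r2⟩
              · simp at h
              · have props1 := parseB_props f cs' inner (d :: r2) h1
                have hd13 := props1.2.2 d r2 rfl
                have hlr1 : (d :: r2).length ≤ cs'.length := props1.1
                have hr2f : r2.length < f := by
                  simp only [List.length_cons] at hlr1; omega
                simp only [Char.reduceEq, reduceIte] at h
                by_cases hd2 : d = ')'
                · subst hd2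
                  rw [if_neg (not_not_intro (Or.inr (Or.inl rfl)))] at h
                  simp at h
                · have hok : ¬(d = '(' ∨ d = ')' ∨ d = '[') := by
                    rintro (h' | h' | h')
                    exacts [hd13.1 h', hd2 h', hd13.2 h']
                  rw [if_pos hok] at h
                  rcases h2 : parseB f r2 with _ | ⟨t2, r3⟩ <;> rw [h2] at h
                  · simp at h
                  · simp only [Option.some.injEq, Prod.mk.injEq] at h
                    obtain ⟨ht, hr⟩ := h
                    subst ht; subst hr
                    obtain ⟨p1, hp1, heq1⟩ :=
                      (ih cs' hlen').2 inner (d :: r2) h1 ('[' :: st) (res * 3) ans '['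
                    set v : Int :=
                      (if (d :: r2).length = cs'.length then (3:Int) else 3 * inner) with hv
                    obtain ⟨p3, hp3, heq3⟩ :=
                      (ih r2 hr2f).2 t2 r3 h2 st res (ans + res * v) d
                    have hans :
                        (if p1 = '[' then ans + res * 3 * inner + (res * 3)
                          else ans + res * 3 * inner) = ans + res * v := by
                      rcases hp1 with ⟨hre, hpe⟩ | ⟨hrl, hne1, hne2⟩
                      · have hinner : inner = 0 := props1.2.1 (by rw [hre])
                        rw [hv, if_pos hpe, if_pos (by rw [hre]), hinner]
                        ring
                      · rw [hv, if_neg hne2,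
                          if_neg (by simp only [List.length_cons] at hrl ⊢; omega)]
                        ring
                    refine ⟨p3, Or.inr ⟨?_, ?_⟩, ?_⟩
                    · rcases hp3 with ⟨h3e, _⟩ | ⟨h3l, _⟩
                      · rw [h3e]; simp only [List.length_cons] at hlr1 ⊢; omega
                      · simp only [List.length_cons] at hlr1 ⊢; omega
                    · rcases hp3 with ⟨_, hpe⟩ | ⟨_, hne⟩
                      · rw [hpe]; exact ⟨hd13.1, hd13.2⟩
                      · exact hne
                    · rw [loopH_open_brack, heq1,
                        loopH_stray_close p1 d hd13.1 hd2 hd13.2,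
                        floordiv_mul_cancel res 3 (by norm_num), hans, heq3]
                      congr 1
                      ring
      · -- c is not an opener
        refine ⟨?_, ?_⟩
        · intro h
          rw [parseB, if_neg hc] at h
          simp at h
        · intro t rest h st res ans prev
          rw [parseB, if_neg hc] at h
          simp only [Option.some.injEq, Prod.mk.injEq] at h
          obtain ⟨ht, hr⟩ := h
          subst ht; subst hr
          exact ⟨prev, Or.inl ⟨rfl, rfl⟩, by rw [mul_zero, add_zero]⟩

lemma sol_eq (s : String) : solution s = solution_alt s := by
  unfold solution solution_alt
  have hb := loopA_eq_loopH s.toList s.toList.length 0 (by omega) [] 1 0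
  rw [List.drop_zero] at hb
  rw [hb]
  rcases h : parseB (s.toList.length + 1) s.toList with _ | ⟨t, rest⟩
  · rw [(mainB (s.toList.length + 1) s.toList (by omega)).1 h]
  · obtain ⟨p, hp, heq⟩ :=
      (mainB (s.toList.length + 1) s.toList (by omega)).2 t rest h [] 1 0
        ((PySem.List.pyGet? s.toList (((0 : Nat) : Int) - 1)).getD ' ')
    rw [heq]
    rcases rest with _ | ⟨d, r2⟩
    · rw [loopH_nil]
      simp
    · have hd := (parseB_props (s.toList.length + 1) s.toList t (d :: r2) h).2.2 d r2 rfl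
      by_cases hd2 : d = ')'
      · subst hd2
        rw [loopH_close_paren_empty]
        simp
      · rw [loopH_stray_empty p d hd.1 hd2 hd.2]
        simp

-- ===== VERDICT (by name: the statement is the Claim_ definition above) =====
theorem solution_spec : Claim_equal_solution := by
  intro s _
  unfold Spec_solution
  exact sol_eq s
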